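-- pv_equiv track=rewrite | github.com/Adelino347/matrices_calculator | funcoes/identificadorDeTipos.py | isMatrizAntiSimetrica
-- ===== SOURCE A (Python) =====
-- def isMatrizQuadrada(matriz):
--     """
--     Dada uma matriz analisa se ela é uma matriz quadrada (matriz que possui o números
--     de linhas equivalente ao número de colunas) e retorna True ou False.
--     """
--     resultado = True
--     m = len(matriz)
--     for linha in matriz:
--         n = len(linha)
--         if m != n:
--             resultado = False
--             break
--
--     return resultado
--
-- def isMatrizAntiSimetrica(matriz):
--     """
--     Dada uma matriz, analisa se é anti-simétrica(se sua transposta é igual a sua oposta)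
--     e retorna True ou False.
--     """
--     if isMatrizQuadrada(matriz):
--         resultado = True
--         m = len(matriz); n = len(matriz[0])
--         for i in range(m):
--             for j in range(n):
--                 if matriz[i][j] != -(matriz[j][i]):
--                     resultado = False
--         return resultado
--     else:
--         return False
-- ===== SOURCE B (Python) =====
-- def isMatrizAntiSimetrica(matriz):
--     m = len(matriz)
--     if any(len(linha) != m for linha in matriz):
--         return False
--     transposta = [[linha[j] for linha in matriz] for j in range(m)]
--     oposta_da_transposta = [[-x for x in linha] for linha in transposta]
--     return matriz == oposta_da_transposta
-- ===== Notes on version B (the rewrite author's own statement) =====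
-- stated objective: alternative
-- what changed: B builds the transpose as an explicit table and compares the matrix with its element-wise negation in one structural equality, instead of A's index-based double loop carrying a boolean flag without break.
import Mathlib
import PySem

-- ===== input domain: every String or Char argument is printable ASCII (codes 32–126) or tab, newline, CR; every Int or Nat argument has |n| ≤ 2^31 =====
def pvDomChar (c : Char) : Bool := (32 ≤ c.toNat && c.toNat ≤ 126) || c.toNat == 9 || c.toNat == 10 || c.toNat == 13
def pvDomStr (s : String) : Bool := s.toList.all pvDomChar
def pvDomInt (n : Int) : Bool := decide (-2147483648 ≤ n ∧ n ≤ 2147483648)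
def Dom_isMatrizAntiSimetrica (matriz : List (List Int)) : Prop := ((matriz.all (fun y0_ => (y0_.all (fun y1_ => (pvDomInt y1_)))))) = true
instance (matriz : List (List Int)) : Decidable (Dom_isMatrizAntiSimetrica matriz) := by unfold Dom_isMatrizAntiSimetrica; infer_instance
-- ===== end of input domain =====

-- B replaces A's flag-carrying double index loop by building the transpose explicitly
-- and comparing the matrix with its element-wise negation (alternative decomposition, same cost).


-- ===== PORT A =====
-- the 'for linha in matriz: … break' loop of isMatrizQuadrada, as structural recursion
def quadradaLoop (m : Nat) : List (List Int) → Bool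
  | [] => true
  | linha :: resto => if m ≠ linha.length then false else quadradaLoop m resto

def isMatrizQuadrada (matriz : List (List Int)) : Bool :=
  quadradaLoop matriz.length matriz

-- matriz[i][j] inside the loops: all indices are in range there (the matrix is square
-- and nonempty in that branch), so plain getD is exact; matriz[0] is head? (none = IndexError,
-- excluded by Pre_).
def isMatrizAntiSimetrica (matriz : List (List Int)) : Bool :=
  if isMatrizQuadrada matriz then
    match matriz.head? with
    | none => false  -- Python raises IndexError here; outside Pre_
    | some linha0 =>
      let m := matriz.length
      let n := linha0.length
      (List.range m).foldl (fun resultado i =>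
        (List.range n).foldl (fun resultado j =>
          if (matriz.getD i []).getD j 0 ≠ -((matriz.getD j []).getD i 0) then false
          else resultado) resultado) true
  else false

-- ===== PORT B =====
-- linha[j] in B's comprehension: j < m = row length there, so getD is exact.
def isMatrizAntiSimetrica_alt (matriz : List (List Int)) : Bool :=
  let m := matriz.length
  if matriz.any (fun linha => linha.length ≠ m) then false
  else
    let transposta := (List.range m).map (fun j => matriz.map (fun linha => linha.getD j 0))
    let opostaDaTransposta := transposta.map (fun linha => linha.map (fun x => -x))
    decide (matriz = opostaDaTransposta)

-- ===== PRECONDITION & SPEC =====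
-- Pre_ excludes only the empty matrix, on which A raises IndexError (it evaluates matriz[0]
-- after the vacuous squareness check); B returns True there.
def Pre_isMatrizAntiSimetrica (matriz : List (List Int)) : Prop := matriz ≠ []
instance (matriz : List (List Int)) : Decidable (Pre_isMatrizAntiSimetrica matriz) := by unfold Pre_isMatrizAntiSimetrica; infer_instance
def pvWitness_isMatrizAntiSimetrica : List (List Int) := [[0, 1], [-1, 0]]

def Spec_isMatrizAntiSimetrica (matriz : List (List Int)) (out : Bool) : Prop := out = isMatrizAntiSimetrica_alt matriz
instance (matriz : List (List Int)) (out : Bool) : Decidable (Spec_isMatrizAntiSimetrica matriz out) := by unfold Spec_isMatrizAntiSimetrica; infer_instance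

-- ===== CLAIM (what is proved, stated in full; the proofs are below) =====
def Claim_equal_isMatrizAntiSimetrica : Prop := ∀ (matriz : List (List Int)), Dom_isMatrizAntiSimetrica matriz → Pre_isMatrizAntiSimetrica matriz → Spec_isMatrizAntiSimetrica matriz (isMatrizAntiSimetrica matriz)

-- ===== LEMMAS AND PROOFS =====

-- the squareness / pointwise-antisymmetry characterisation shared by both proofs
def Sq (matriz : List (List Int)) : Prop := ∀ linha ∈ matriz, linha.length = matriz.length
def Pw (matriz : List (List Int)) : Prop :=
  ∀ i < matriz.length, ∀ j < matriz.length,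
    (matriz.getD i []).getD j 0 = -((matriz.getD j []).getD i 0)

theorem quadradaLoop_eq_all (m : Nat) (xs : List (List Int)) :
    quadradaLoop m xs = xs.all (fun l => decide (l.length = m)) := by
  induction xs with
  | nil => rfl
  | cons l xs ih =>
      simp only [quadradaLoop, List.all_cons]
      by_cases h : m = l.length
      · subst h; simp [ih]
      · simp [h, Ne.symm h]

theorem isMatrizQuadrada_iff (matriz : List (List Int)) :
    isMatrizQuadrada matriz = true ↔ Sq matriz := by
  simp [isMatrizQuadrada, quadradaLoop_eq_all, Sq]

theorem foldl_flag {α : Type} (p : α → Prop) [DecidablePred p] (l : List α) (b : Bool) :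
    l.foldl (fun res i => if p i then false else res) b
      = (b && l.all (fun i => !decide (p i))) := by
  induction l generalizing b with
  | nil => simp
  | cons x xs ih =>
      simp only [List.foldl_cons, List.all_cons, ih]
      by_cases h : p x <;> simp [h]

theorem foldl_and {α : Type} (c : α → Bool) (l : List α) (b : Bool) :
    l.foldl (fun res i => res && c i) b = (b && l.all c) := by
  induction l generalizing b with
  | nil => simp
  | cons x xs ih => simp [List.foldl_cons, ih, Bool.and_assoc]

theorem A_true_iff (matriz : List (List Int)) (hne : matriz ≠ []) :
    isMatrizAntiSimetrica matriz = true ↔ Sq matriz ∧ Pw matriz := by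
  unfold isMatrizAntiSimetrica
  by_cases hsq : isMatrizQuadrada matriz = true
  · obtain ⟨l0, rest, rfl⟩ := List.exists_cons_of_ne_nil hne
    have hsq' := (isMatrizQuadrada_iff _).mp hsq
    have hl0 : l0.length = (l0 :: rest).length := hsq' l0 (List.mem_cons_self)
    simp only [hsq, if_pos, List.head?_cons]
    have hinner : ∀ (i : Nat) (b : Bool),
        (List.range l0.length).foldl (fun resultado j =>
          if ((l0 :: rest).getD i []).getD j 0 ≠ -(((l0 :: rest).getD j []).getD i 0)
          then false else resultado) b
        = (b && (List.range l0.length).all (fun j =>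
            !decide (((l0 :: rest).getD i []).getD j 0 ≠ -(((l0 :: rest).getD j []).getD i 0)))) := by
      intro i b
      exact foldl_flag (fun j => ((l0 :: rest).getD i []).getD j 0 ≠ -(((l0 :: rest).getD j []).getD i 0)) _ b
    simp only [hinner]
    rw [foldl_and]
    simp only [Bool.true_and, List.all_eq_true, List.mem_range, Bool.not_eq_eq_eq_not,
      Bool.not_true, decide_eq_false_iff_not, not_not]
    constructor
    · intro h
      refine ⟨hsq', ?_⟩
      intro i hi j hj
      exact h i hi j (hl0 ▸ hj)
    · rintro ⟨-, h⟩ i hi j hj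
      exact h i hi j (hl0 ▸ hj)
  · rw [if_neg hsq]
    simp only [Bool.false_eq_true, false_iff]
    rintro ⟨h, -⟩
    exact hsq ((isMatrizQuadrada_iff _).mpr h)

theorem B_true_iff (matriz : List (List Int)) :
    isMatrizAntiSimetrica_alt matriz = true ↔ Sq matriz ∧ Pw matriz := by
  unfold isMatrizAntiSimetrica_alt
  by_cases hany : matriz.any (fun linha => linha.length ≠ matriz.length) = true
  · rw [if_pos hany]
    simp only [Bool.false_eq_true, false_iff]
    rintro ⟨h, -⟩
    simp only [List.any_eq_true, decide_eq_true_eq] at hany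
    obtain ⟨l, hl, hne⟩ := hany
    exact hne (h l hl)
  · have hsq : Sq matriz := by
      intro l hl
      by_contra hne
      exact hany (by simp only [List.any_eq_true, decide_eq_true_eq]; exact ⟨l, hl, hne⟩)
    rw [if_neg hany]
    simp only [decide_eq_true_eq, List.map_map]
    constructor
    · intro heq
      refine ⟨hsq, ?_⟩
      intro i hi j hj
      have h := congrArg (fun t => (t.getD i []).getD j 0) heq
      simp only at h
      rw [h]
      simp [List.getD, hi, hj]
    · rintro ⟨-, hpw⟩
      apply List.ext_getElem
      · simp
      · intro i hi hi'
        have hlen : (matriz[i]'hi).length = matriz.length := hsq _ (List.getElem_mem hi)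
        apply List.ext_getElem
        · simpa using hlen
        · intro j hj hj'
          have hjm : j < matriz.length := by rwa [hlen] at hj
          have hpw' := hpw i hi j hjm
          have hji : i < (matriz[j]'hjm).length := by
            rw [hsq _ (List.getElem_mem hjm)]; exact hi
          have hgi : (matriz.getD i []).getD j 0 = (matriz[i]'hi)[j]'hj := by
            simp [List.getD, List.getElem?_eq_getElem hi, List.getElem?_eq_getElem hj]
          have hgj : (matriz.getD j []).getD i 0 = (matriz[j]'hjm)[i]'hji := by
            simp [List.getD, List.getElem?_eq_getElem hjm, List.getElem?_eq_getElem hji]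
          rw [hgi, hgj] at hpw'
          simp only [List.getElem_map, List.getElem_range, Function.comp_apply]
          rw [hpw']
          simp [List.getD, List.getElem?_eq_getElem hji]

-- ===== VERDICT (by name: the statement is the Claim_ definition above) =====
theorem isMatrizAntiSimetrica_spec : Claim_equal_isMatrizAntiSimetrica := by
  intro matriz _ hpre
  unfold Spec_isMatrizAntiSimetrica
  have := (A_true_iff matriz hpre).trans (B_true_iff matriz).symm
  exact Bool.eq_iff_iff.mpr this |>.symm ▸ rfl
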